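-- pv_equiv track=rewrite | github.com/ommnyomnyong/GroupProject | db/chunking/regex_chunks_sop.py | infer_jurisdiction
-- ===== SOURCE A (Python) =====
-- def infer_jurisdiction(path):
--     path_lower = path.lower()
--     if any(x in path_lower for x in ['eu', 'ema', 'european']):
--         return 'EU'
--     if any(x in path_lower for x in ['fda', 'usfda', 'cfr', '21cfr']):
--         return 'US-FDA'
--     if 'who' in path_lower:
--         return 'WHO'
--     if 'pic' in path_lower:
--         return 'PIC/S'
--     if any(x in path_lower for x in ['mfds', 'kfda', 'korea']):
--         return 'KR-MFDS'
--     if any(x in path_lower for x in ['ich', 'international']):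
--         return 'ICH'
--     return None
-- ===== SOURCE B (Python) =====
-- LABELS = ['EU', 'US-FDA', 'WHO', 'PIC/S', 'KR-MFDS', 'ICH']
-- KEYWORDS = [
--     ('eu', 0), ('ema', 0), ('european', 0),
--     ('fda', 1), ('usfda', 1), ('cfr', 1), ('21cfr', 1),
--     ('who', 2),
--     ('pic', 3),
--     ('mfds', 4), ('kfda', 4), ('korea', 4),
--     ('ich', 5), ('international', 5),
-- ]
--
--
-- def infer_jurisdiction(path):
--     # One left-to-right scan over positions, accumulating the minimum
--     # priority of any keyword that starts at that position.
--     p = path.lower()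
--     best = len(LABELS)
--     for i in range(len(p)):
--         for kw, pri in KEYWORDS:
--             if p.startswith(kw, i):
--                 best = min(best, pri)
--     return LABELS[best] if best < len(LABELS) else None
-- ===== Notes on version B (the rewrite author's own statement) =====
-- stated objective: alternative
-- what changed: Instead of A's staged per-group substring membership tests with early return, B makes a single left-to-right scan over the positions of the lowered path, accumulating the minimum priority index of any keyword starting at each position, and maps the final minimum to its label at the end.
import Mathlib
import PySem

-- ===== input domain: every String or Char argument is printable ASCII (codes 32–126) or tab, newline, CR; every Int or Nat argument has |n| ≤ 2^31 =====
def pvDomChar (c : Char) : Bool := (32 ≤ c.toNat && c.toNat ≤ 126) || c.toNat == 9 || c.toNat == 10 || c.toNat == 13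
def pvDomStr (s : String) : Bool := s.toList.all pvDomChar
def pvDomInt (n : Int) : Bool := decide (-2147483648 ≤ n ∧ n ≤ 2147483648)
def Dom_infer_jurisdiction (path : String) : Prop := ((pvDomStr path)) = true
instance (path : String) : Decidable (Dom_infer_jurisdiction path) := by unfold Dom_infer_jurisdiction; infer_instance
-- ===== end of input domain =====

-- B replaces A's staged per-group membership tests by one positional scan that
-- accumulates the minimum matching priority (alternative decomposition; same cost).

-- ===== PORT A =====
def infer_jurisdiction (path : String) : Option String :=
  let path_lower := PySem.Str.lower path
  if (["eu", "ema", "european"].any fun x => PySem.Str.isIn x path_lower) then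
    some "EU"
  else if (["fda", "usfda", "cfr", "21cfr"].any fun x => PySem.Str.isIn x path_lower) then
    some "US-FDA"
  else if PySem.Str.isIn "who" path_lower then
    some "WHO"
  else if PySem.Str.isIn "pic" path_lower then
    some "PIC/S"
  else if (["mfds", "kfda", "korea"].any fun x => PySem.Str.isIn x path_lower) then
    some "KR-MFDS"
  else if (["ich", "international"].any fun x => PySem.Str.isIn x path_lower) then
    some "ICH"
  else
    none

-- ===== PORT B =====
def pvLabels : List String := ["EU", "US-FDA", "WHO", "PIC/S", "KR-MFDS", "ICH"]

def pvKeywords : List (List Char × Nat) :=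
  [("eu".toList, 0), ("ema".toList, 0), ("european".toList, 0),
   ("fda".toList, 1), ("usfda".toList, 1), ("cfr".toList, 1), ("21cfr".toList, 1),
   ("who".toList, 2),
   ("pic".toList, 3),
   ("mfds".toList, 4), ("kfda".toList, 4), ("korea".toList, 4),
   ("ich".toList, 5), ("international".toList, 5)]

-- p.startswith(kw, i) with 0 ≤ i ≤ len(p) is exactly "kw is a prefix of p[i:]";
-- ported as PySem.Chars.startswith (p.drop i) kw (exact on the indices range(len p) produces).
def infer_jurisdiction_alt (path : String) : Option String :=
  let p := (PySem.Str.lower path).toList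
  let best := (List.range p.length).foldl
    (fun best i => pvKeywords.foldl
      (fun best kp => if PySem.Chars.startswith (p.drop i) kp.1 then min best kp.2 else best)
      best)
    pvLabels.length
  if best < pvLabels.length then PySem.List.pyGet? pvLabels (best : Int) else none

-- ===== PRECONDITION & SPEC =====
def Spec_infer_jurisdiction (path : String) (out : Option String) : Prop := out = infer_jurisdiction_alt path
instance (path : String) (out : Option String) : Decidable (Spec_infer_jurisdiction path out) := by unfold Spec_infer_jurisdiction; infer_instance

-- ===== CLAIM =====
def Claim_equal_infer_jurisdiction : Prop := ∀ (path : String), Dom_infer_jurisdiction path → Spec_infer_jurisdiction path (infer_jurisdiction path)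

-- ===== LEMMAS AND PROOFS =====

-- Characterisation of the inner "min over matches" fold.
theorem foldl_min_le_iff {α : Type} (P : α → Bool) (f : α → Nat) (l : List α) (b k : Nat) :
    l.foldl (fun b x => if P x then min b (f x) else b) b ≤ k ↔
      (b ≤ k ∨ ∃ x ∈ l, P x = true ∧ f x ≤ k) := by
  induction l generalizing b with
  | nil => simp
  | cons x l ih =>
    simp only [List.foldl_cons, ih, List.mem_cons]
    by_cases h : P x = true
    · simp only [h, if_true, min_le_iff]
      constructor
      · rintro ((hb | hf) | ⟨y, hy, hPy, hfy⟩)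
        · exact Or.inl hb
        · exact Or.inr ⟨x, Or.inl rfl, h, hf⟩
        · exact Or.inr ⟨y, Or.inr hy, hPy, hfy⟩
      · rintro (hb | ⟨y, (rfl | hy), hPy, hfy⟩)
        · exact Or.inl (Or.inl hb)
        · exact Or.inl (Or.inr hfy)
        · exact Or.inr ⟨y, hy, hPy, hfy⟩
    · simp only [h, Bool.false_eq_true, if_false]
      constructor
      · rintro (hb | ⟨y, hy, hPy, hfy⟩)
        · exact Or.inl hb
        · exact Or.inr ⟨y, Or.inr hy, hPy, hfy⟩
      · rintro (hb | ⟨y, (rfl | hy), hPy, hfy⟩)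
        · exact Or.inl hb
        · exact absurd hPy h
        · exact Or.inr ⟨y, hy, hPy, hfy⟩

-- Characterisation of the nested position × keyword fold.
theorem foldl2_min_le_iff {ι α : Type} (L : List ι) (M : List α) (P : ι → α → Bool)
    (f : α → Nat) (b k : Nat) :
    L.foldl (fun b i => M.foldl (fun b x => if P i x then min b (f x) else b) b) b ≤ k ↔
      (b ≤ k ∨ ∃ i ∈ L, ∃ x ∈ M, P i x = true ∧ f x ≤ k) := by
  induction L generalizing b with
  | nil => simp
  | cons i L ih =>
    simp only [List.foldl_cons, ih, foldl_min_le_iff, List.mem_cons]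
    constructor
    · rintro ((h | ⟨x, hx, hP, hf⟩) | ⟨j, hj, x, hx, hP, hf⟩)
      · exact Or.inl h
      · exact Or.inr ⟨i, Or.inl rfl, x, hx, hP, hf⟩
      · exact Or.inr ⟨j, Or.inr hj, x, hx, hP, hf⟩
    · rintro (h | ⟨j, (rfl | hj), x, hx, hP, hf⟩)
      · exact Or.inl (Or.inl h)
      · exact Or.inl (Or.inr ⟨x, hx, hP, hf⟩)
      · exact Or.inr ⟨j, hj, x, hx, hP, hf⟩

-- A keyword occurs at some scanned position iff it is a substring (keywords are nonempty).
theorem exists_lt_prefix_iff (p kw : List Char) (h : kw ≠ []) :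
    (∃ i < p.length, PySem.Chars.startswith (p.drop i) kw = true) ↔
      PySem.Chars.isIn kw p = true := by
  rw [← PySem.Chars.exists_prefix_drop_iff_isIn]
  constructor
  · rintro ⟨i, -, hs⟩
    exact ⟨i, (PySem.Chars.startswith_iff _ _).mp hs⟩
  · rintro ⟨j, hj⟩
    have hjlt : j < p.length := by
      by_contra hge
      rw [not_lt] at hge
      rw [List.drop_eq_nil_of_le hge] at hj
      exact h (List.prefix_nil.mp hj)
    exact ⟨j, hjlt, (PySem.Chars.startswith_iff _ _).mpr hj⟩

-- ===== VERDICT =====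
set_option maxHeartbeats 1600000 in
theorem infer_jurisdiction_spec : Claim_equal_infer_jurisdiction := by
  intro path _
  unfold Spec_infer_jurisdiction infer_jurisdiction infer_jurisdiction_alt
  set p := (PySem.Str.lower path).toList with hp
  simp only []
  have key : ∀ k : Nat,
      ((List.range p.length).foldl
        (fun best i => pvKeywords.foldl
          (fun best kp => if PySem.Chars.startswith (p.drop i) kp.1 then min best kp.2 else best)
          best) pvLabels.length) ≤ k ↔
      (pvLabels.length ≤ k ∨ ∃ kp ∈ pvKeywords,
        (∃ i ∈ List.range p.length, PySem.Chars.startswith (p.drop i) kp.1 = true) ∧ kp.2 ≤ k) := by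
    intro k
    rw [foldl2_min_le_iff]
    constructor
    · rintro (h | ⟨i, hi, kp, hkp, hP, hf⟩)
      · exact Or.inl h
      · exact Or.inr ⟨kp, hkp, ⟨i, hi, hP⟩, hf⟩
    · rintro (h | ⟨kp, hkp, ⟨i, hi, hP⟩, hf⟩)
      · exact Or.inl h
      · exact Or.inr ⟨i, hi, kp, hkp, hP, hf⟩
  set best := (List.range p.length).foldl
    (fun best i => pvKeywords.foldl
      (fun best kp => if PySem.Chars.startswith (p.drop i) kp.1 then min best kp.2 else best)
      best)
    pvLabels.length with hbest
  have h0 : best ≤ 0 ↔ (PySem.Chars.isIn ['e','u'] p = true ∨ PySem.Chars.isIn ['e','m','a'] p = true ∨ PySem.Chars.isIn ['e','u','r','o','p','e','a','n'] p = true) := by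
    rw [key 0]
    simp [pvKeywords, pvLabels, exists_lt_prefix_iff]
  have h1 : best ≤ 1 ↔ (PySem.Chars.isIn ['e','u'] p = true ∨ PySem.Chars.isIn ['e','m','a'] p = true ∨ PySem.Chars.isIn ['e','u','r','o','p','e','a','n'] p = true ∨ PySem.Chars.isIn ['f','d','a'] p = true ∨ PySem.Chars.isIn ['u','s','f','d','a'] p = true ∨ PySem.Chars.isIn ['c','f','r'] p = true ∨ PySem.Chars.isIn ['2','1','c','f','r'] p = true) := by
    rw [key 1]
    simp [pvKeywords, pvLabels, exists_lt_prefix_iff]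
  have h2 : best ≤ 2 ↔ (PySem.Chars.isIn ['e','u'] p = true ∨ PySem.Chars.isIn ['e','m','a'] p = true ∨ PySem.Chars.isIn ['e','u','r','o','p','e','a','n'] p = true ∨ PySem.Chars.isIn ['f','d','a'] p = true ∨ PySem.Chars.isIn ['u','s','f','d','a'] p = true ∨ PySem.Chars.isIn ['c','f','r'] p = true ∨ PySem.Chars.isIn ['2','1','c','f','r'] p = true ∨ PySem.Chars.isIn ['w','h','o'] p = true) := by
    rw [key 2]
    simp [pvKeywords, pvLabels, exists_lt_prefix_iff]
  have h3 : best ≤ 3 ↔ (PySem.Chars.isIn ['e','u'] p = true ∨ PySem.Chars.isIn ['e','m','a'] p = true ∨ PySem.Chars.isIn ['e','u','r','o','p','e','a','n'] p = true ∨ PySem.Chars.isIn ['f','d','a'] p = true ∨ PySem.Chars.isIn ['u','s','f','d','a'] p = true ∨ PySem.Chars.isIn ['c','f','r'] p = true ∨ PySem.Chars.isIn ['2','1','c','f','r'] p = true ∨ PySem.Chars.isIn ['w','h','o'] p = true ∨ PySem.Chars.isIn ['p','i','c'] p = true) := by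
    rw [key 3]
    simp [pvKeywords, pvLabels, exists_lt_prefix_iff]
  have h4 : best ≤ 4 ↔ (PySem.Chars.isIn ['e','u'] p = true ∨ PySem.Chars.isIn ['e','m','a'] p = true ∨ PySem.Chars.isIn ['e','u','r','o','p','e','a','n'] p = true ∨ PySem.Chars.isIn ['f','d','a'] p = true ∨ PySem.Chars.isIn ['u','s','f','d','a'] p = true ∨ PySem.Chars.isIn ['c','f','r'] p = true ∨ PySem.Chars.isIn ['2','1','c','f','r'] p = true ∨ PySem.Chars.isIn ['w','h','o'] p = true ∨ PySem.Chars.isIn ['p','i','c'] p = true ∨ PySem.Chars.isIn ['m','f','d','s'] p = true ∨ PySem.Chars.isIn ['k','f','d','a'] p = true ∨ PySem.Chars.isIn ['k','o','r','e','a'] p = true) := by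
    rw [key 4]
    simp [pvKeywords, pvLabels, exists_lt_prefix_iff]
  have h5 : best ≤ 5 ↔ (PySem.Chars.isIn ['e','u'] p = true ∨ PySem.Chars.isIn ['e','m','a'] p = true ∨ PySem.Chars.isIn ['e','u','r','o','p','e','a','n'] p = true ∨ PySem.Chars.isIn ['f','d','a'] p = true ∨ PySem.Chars.isIn ['u','s','f','d','a'] p = true ∨ PySem.Chars.isIn ['c','f','r'] p = true ∨ PySem.Chars.isIn ['2','1','c','f','r'] p = true ∨ PySem.Chars.isIn ['w','h','o'] p = true ∨ PySem.Chars.isIn ['p','i','c'] p = true ∨ PySem.Chars.isIn ['m','f','d','s'] p = true ∨ PySem.Chars.isIn ['k','f','d','a'] p = true ∨ PySem.Chars.isIn ['k','o','r','e','a'] p = true ∨ PySem.Chars.isIn ['i','c','h'] p = true ∨ PySem.Chars.isIn ['i','n','t','e','r','n','a','t','i','o','n','a','l'] p = true) := by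
    rw [key 5]
    simp [pvKeywords, pvLabels, exists_lt_prefix_iff]
  have h6 : best ≤ 6 := (key 6).mpr (Or.inl (by simp [pvLabels]))
  clear key hbest
  by_cases g0 : (PySem.Chars.isIn ['e','u'] p = true ∨ PySem.Chars.isIn ['e','m','a'] p = true ∨ PySem.Chars.isIn ['e','u','r','o','p','e','a','n'] p = true)
  · have hb : best = 0 := Nat.le_zero.mp (h0.mpr g0)
    rcases g0 with m|m|m <;> rw [hb] <;>
      simp [← hp, m, pvLabels, PySem.List.pyGet?, PySem.List.pyIdx?]
  by_cases g1 : (PySem.Chars.isIn ['f','d','a'] p = true ∨ PySem.Chars.isIn ['u','s','f','d','a'] p = true ∨ PySem.Chars.isIn ['c','f','r'] p = true ∨ PySem.Chars.isIn ['2','1','c','f','r'] p = true)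
  · simp only [not_or, Bool.not_eq_true] at g0
    have hle : best ≤ 1 := h1.mpr (Or.inr (Or.inr (Or.inr (g1))))
    have hgt : ¬ best ≤ 0 := fun hle0 => by
      rcases h0.mp hle0 with m|m|m <;> simp [g0] at m
    have hb : best = 1 := by omega
    rcases g1 with m|m|m|m <;> rw [hb] <;>
      simp [← hp, m, g0, pvLabels, PySem.List.pyGet?, PySem.List.pyIdx?]
  by_cases g2 : (PySem.Chars.isIn ['w','h','o'] p = true)
  · simp only [not_or, Bool.not_eq_true] at g0
    simp only [not_or, Bool.not_eq_true] at g1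
    have hle : best ≤ 2 := h2.mpr (Or.inr (Or.inr (Or.inr (Or.inr (Or.inr (Or.inr (Or.inr (g2))))))))
    have hgt : ¬ best ≤ 1 := fun hle0 => by
      rcases h1.mp hle0 with m|m|m|m|m|m|m <;> simp [g0, g1] at m
    have hb : best = 2 := by omega
    rw [hb]
    simp [← hp, g2, g0, g1, pvLabels, PySem.List.pyGet?, PySem.List.pyIdx?]
  by_cases g3 : (PySem.Chars.isIn ['p','i','c'] p = true)
  · simp only [not_or, Bool.not_eq_true] at g0
    simp only [not_or, Bool.not_eq_true] at g1
    simp only [Bool.not_eq_true] at g2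
    have hle : best ≤ 3 := h3.mpr (Or.inr (Or.inr (Or.inr (Or.inr (Or.inr (Or.inr (Or.inr (Or.inr (g3)))))))))
    have hgt : ¬ best ≤ 2 := fun hle0 => by
      rcases h2.mp hle0 with m|m|m|m|m|m|m|m <;> simp [g0, g1, g2] at m
    have hb : best = 3 := by omega
    rw [hb]
    simp [← hp, g3, g0, g1, g2, pvLabels, PySem.List.pyGet?, PySem.List.pyIdx?]
  by_cases g4 : (PySem.Chars.isIn ['m','f','d','s'] p = true ∨ PySem.Chars.isIn ['k','f','d','a'] p = true ∨ PySem.Chars.isIn ['k','o','r','e','a'] p = true)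
  · simp only [not_or, Bool.not_eq_true] at g0
    simp only [not_or, Bool.not_eq_true] at g1
    simp only [Bool.not_eq_true] at g2
    simp only [Bool.not_eq_true] at g3
    have hle : best ≤ 4 := h4.mpr (Or.inr (Or.inr (Or.inr (Or.inr (Or.inr (Or.inr (Or.inr (Or.inr (Or.inr (g4))))))))))
    have hgt : ¬ best ≤ 3 := fun hle0 => by
      rcases h3.mp hle0 with m|m|m|m|m|m|m|m|m <;> simp [g0, g1, g2, g3] at m
    have hb : best = 4 := by omega
    rcases g4 with m|m|m <;> rw [hb] <;>
      simp [← hp, m, g0, g1, g2, g3, pvLabels, PySem.List.pyGet?, PySem.List.pyIdx?]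
  by_cases g5 : (PySem.Chars.isIn ['i','c','h'] p = true ∨ PySem.Chars.isIn ['i','n','t','e','r','n','a','t','i','o','n','a','l'] p = true)
  · simp only [not_or, Bool.not_eq_true] at g0
    simp only [not_or, Bool.not_eq_true] at g1
    simp only [Bool.not_eq_true] at g2
    simp only [Bool.not_eq_true] at g3
    simp only [not_or, Bool.not_eq_true] at g4
    have hle : best ≤ 5 := h5.mpr (Or.inr (Or.inr (Or.inr (Or.inr (Or.inr (Or.inr (Or.inr (Or.inr (Or.inr (Or.inr (Or.inr (Or.inr (g5)))))))))))))
    have hgt : ¬ best ≤ 4 := fun hle0 => by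
      rcases h4.mp hle0 with m|m|m|m|m|m|m|m|m|m|m|m <;> simp [g0, g1, g2, g3, g4] at m
    have hb : best = 5 := by omega
    rcases g5 with m|m <;> rw [hb] <;>
      simp [← hp, m, g0, g1, g2, g3, g4, pvLabels, PySem.List.pyGet?, PySem.List.pyIdx?]
  simp only [not_or, Bool.not_eq_true] at g0 g1 g4 g5
  simp only [Bool.not_eq_true] at g2 g3
  have hgt : ¬ best ≤ 5 := fun hle0 => by
    rcases h5.mp hle0 with m|m|m|m|m|m|m|m|m|m|m|m|m|m <;> simp [g0, g1, g2, g3, g4, g5] at m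
  have hb : best = 6 := by omega
  rw [hb]
  simp [← hp, g0, g1, g2, g3, g4, g5, pvLabels]
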